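-- pv_equiv track=rewrite | github.com/pablouwunya2021/proyecto2_teoria | src/cnf_converter.py | generate_nullable_combinations
-- ===== SOURCE A (Python) =====
-- from typing import Dict, List, Set, Tuple
--
-- def generate_nullable_combinations(production: List[str], nullable: Set[str]) -> List[List[str]]:
--     """
--     Genera todas las combinaciones posibles eliminando símbolos anulables.
--
--     Args:
--         production (List[str]): Producción original
--         nullable (Set[str]): Símbolos anulables
--
--     Returns:
--         List[List[str]]: Lista de nuevas producciones
--     """
--     if not production:
--         return [[]]
--
--     combinations = []
--
--     n = len(production)
--     # Generar todas las combinaciones posibles (2^n)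
--     for mask in range(1 << n):
--         combination = []
--         for i in range(n):
--             if mask & (1 << i):
--                 combination.append(production[i])
--             elif production[i] not in nullable:
--                 # Si el símbolo no es anulable y no lo incluimos,
--                 # la combinación no es válida
--                 combination = None
--                 break
--
--         if combination is not None and combination:
--             combinations.append(combination)
--
--     # Eliminar duplicados
--     seen = set()
--     unique_combinations = []
--     for combo in combinations:
--         combo_tuple = tuple(combo)
--         if combo_tuple not in seen:
--             seen.add(combo_tuple)
--             unique_combinations.append(combo)
--
--     return unique_combinations
-- ===== SOURCE B (Python) =====
-- def generate_nullable_combinations(production, nullable):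
--     # Structural doubling over nullable symbols only: O(2^k * n) for k nullable
--     # positions, instead of scanning all 2^n bitmasks.
--     if not production:
--         return [[]]
--     combos = [[]]
--     for sym in reversed(production):
--         if sym in nullable:
--             combos = [c for r in combos for c in (r, [sym] + r)]
--         else:
--             combos = [[sym] + r for r in combos]
--     seen = set()
--     unique = []
--     for c in combos:
--         if c:
--             t = tuple(c)
--             if t not in seen:
--                 seen.add(t)
--                 unique.append(c)
--     return unique
-- ===== Notes on version B (the rewrite author's own statement) =====
-- stated objective: faster
-- what changed: B builds the candidate list by a single structural pass that branches (keep/drop) only on nullable symbols, instead of A's scan of all 2^n bitmasks with an inner validity check per mask.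
import Mathlib
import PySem

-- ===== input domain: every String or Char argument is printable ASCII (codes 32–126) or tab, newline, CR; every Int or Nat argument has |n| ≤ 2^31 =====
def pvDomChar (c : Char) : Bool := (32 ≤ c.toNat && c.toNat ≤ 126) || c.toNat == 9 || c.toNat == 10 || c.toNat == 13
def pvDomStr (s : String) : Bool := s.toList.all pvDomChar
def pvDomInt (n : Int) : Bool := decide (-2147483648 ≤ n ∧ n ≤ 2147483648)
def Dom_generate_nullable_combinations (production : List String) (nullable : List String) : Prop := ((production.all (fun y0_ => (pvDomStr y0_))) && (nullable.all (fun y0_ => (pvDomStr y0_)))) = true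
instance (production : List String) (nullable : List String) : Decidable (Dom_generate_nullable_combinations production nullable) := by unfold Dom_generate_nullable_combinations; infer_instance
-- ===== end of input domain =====

-- B replaces A's scan of all 2^n bitmasks by a structural doubling over the production that
-- branches only on nullable symbols (2^k candidates for k nullable positions instead of 2^n masks).

-- ===== PORT A =====
-- inner 'for i in range(n)' loop of A: walk the production with index i, acc = combination,
-- 'combination = None; break' = none
def pvBuildA (nullable : List String) (mask : Nat) : Nat → List String → List String → Option (List String)
  | _, acc, [] => some acc
  | i, acc, s :: rest =>
    if mask.testBit i then pvBuildA nullable mask (i + 1) (acc ++ [s]) rest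
    else if nullable.contains s then pvBuildA nullable mask (i + 1) acc rest
    else none

-- body of A's 'for mask in range(1 << n)' loop: append the combination if not None and nonempty
def pvCollectA (nullable production : List String) (acc : List (List String)) (mask : Nat) :
    List (List String) :=
  match pvBuildA nullable mask 0 [] production with
  | some c => if c ≠ [] then acc ++ [c] else acc
  | none => acc

def generate_nullable_combinations (production : List String) (nullable : List String) : List (List String) :=
  if production = [] then [[]]
  else
    let n := production.length
    let combinations := (List.range (2 ^ n)).foldl (pvCollectA nullable production) []
    -- dedup with a 'seen' set, keeping first occurrences
    (combinations.foldl
      (fun (st : PySem.Set (List String) × List (List String)) combo =>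
        if PySem.Set.contains st.1 combo then st
        else (PySem.Set.add st.1 combo, st.2 ++ [combo]))
      (PySem.Set.empty, [])).2

-- ===== PORT B =====
def generate_nullable_combinations_alt (production : List String) (nullable : List String) : List (List String) :=
  if production = [] then [[]]
  else
    -- for sym in reversed(production): double on nullable symbols, prepend otherwise
    let combos := production.foldr
      (fun sym acc =>
        if nullable.contains sym then acc.flatMap (fun r => [r, sym :: r])
        else acc.map (fun r => sym :: r)) [[]]
    -- dedup nonempty combos with a 'seen' set, keeping first occurrences
    (combos.foldl
      (fun (st : PySem.Set (List String) × List (List String)) c =>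
        if c ≠ [] then
          if PySem.Set.contains st.1 c then st
          else (PySem.Set.add st.1 c, st.2 ++ [c])
        else st)
      (PySem.Set.empty, [])).2

-- ===== PRECONDITION & SPEC =====
def Spec_generate_nullable_combinations (production : List String) (nullable : List String) (out : List (List String)) : Prop := out = generate_nullable_combinations_alt production nullable
instance (production : List String) (nullable : List String) (out : List (List String)) : Decidable (Spec_generate_nullable_combinations production nullable out) := by unfold Spec_generate_nullable_combinations; infer_instance

-- ===== CLAIM (what is proved, stated in full; the proofs are below) =====
def Claim_equal_generate_nullable_combinations : Prop := ∀ (production : List String) (nullable : List String), Dom_generate_nullable_combinations production nullable → Spec_generate_nullable_combinations production nullable (generate_nullable_combinations production nullable)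

-- ===== LEMMAS AND PROOFS =====

-- per-position selection described by a bit function f: f j = keep production[j]
def pvSel (nullable : List String) : (Nat → Bool) → List String → Option (List String)
  | _, [] => some []
  | f, x :: xs =>
    if f 0 then (pvSel nullable (fun j => f (j + 1)) xs).map (x :: ·)
    else if nullable.contains x then pvSel nullable (fun j => f (j + 1)) xs
    else none

theorem pvBuildA_eq_sel (nullable : List String) (mask : Nat) :
    ∀ (prod : List String) (i : Nat) (acc : List String),
      pvBuildA nullable mask i acc prod
        = (pvSel nullable (fun j => mask.testBit (i + j)) prod).map (acc ++ ·) := by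
  intro prod
  induction prod with
  | nil => intro i acc; simp [pvBuildA, pvSel]
  | cons x xs ih =>
    intro i acc
    have hsh : (fun j => mask.testBit (i + 1 + j)) = (fun j => mask.testBit (i + (j + 1))) := by
      funext j; ring_nf
    simp only [pvBuildA, pvSel, Nat.add_zero]
    by_cases hb : mask.testBit i
    · simp only [hb, if_pos]
      rw [ih (i + 1) (acc ++ [x]), hsh]
      cases pvSel nullable (fun j => mask.testBit (i + (j + 1))) xs <;> simp
    · simp only [hb, Bool.false_eq_true, if_neg, not_false_iff]
      by_cases hn : x ∈ nullable
      · simp only [List.contains_eq_mem, hn, decide_true, if_pos]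
        rw [ih (i + 1) acc, hsh]
      · simp [List.contains_eq_mem, hn]

theorem pvBuild_zero (nullable : List String) (mask : Nat) (prod : List String) :
    pvBuildA nullable mask 0 [] prod = pvSel nullable mask.testBit prod := by
  rw [pvBuildA_eq_sel]
  have h0 : (fun j => mask.testBit (0 + j)) = mask.testBit := by funext j; simp
  rw [h0]
  cases pvSel nullable mask.testBit prod <;> simp

-- B's enumeration fold
def pvCombosB (nullable : List String) (prod : List String) : List (List String) :=
  prod.foldr
    (fun sym acc =>
      if nullable.contains sym then acc.flatMap (fun r => [r, sym :: r])
      else acc.map (fun r => sym :: r)) [[]]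

theorem pvRange_double (m : Nat) :
    List.range (2 * m) = (List.range m).flatMap (fun q => [2 * q, 2 * q + 1]) := by
  induction m with
  | zero => simp
  | succ m ih =>
    have h2 : 2 * (m + 1) = (2 * m + 1) + 1 := by ring
    rw [h2, List.range_succ, List.range_succ, List.range_succ, ih]
    simp

theorem pvSel_even (nullable : List String) (q : Nat) (x : String) (xs : List String) :
    pvSel nullable (Nat.testBit (2 * q)) (x :: xs)
      = (if nullable.contains x then pvSel nullable (Nat.testBit q) xs else none) := by
  have hb0 : (2 * q).testBit 0 = false := by simp [Nat.testBit_zero]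
  have hf0 : (fun j => (2 * q).testBit (j + 1)) = Nat.testBit q := by
    funext j; rw [Nat.testBit_add_one]; congr 1; omega
  simp only [pvSel, hb0, Bool.false_eq_true, if_neg, not_false_iff, hf0]

theorem pvSel_odd (nullable : List String) (q : Nat) (x : String) (xs : List String) :
    pvSel nullable (Nat.testBit (2 * q + 1)) (x :: xs)
      = (pvSel nullable (Nat.testBit q) xs).map (x :: ·) := by
  have hb1 : (2 * q + 1).testBit 0 = true := by simp [Nat.testBit_zero]
  have hf1 : (fun j => (2 * q + 1).testBit (j + 1)) = Nat.testBit q := by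
    funext j; rw [Nat.testBit_add_one]; congr 1; omega
  simp only [pvSel, hb1, if_pos, hf1]

theorem pvStep_mem (nullable : List String) (x : String) (xs : List String)
    (hn : x ∈ nullable) :
    ∀ (l : List Nat),
      ((l.flatMap (fun q => [2 * q, 2 * q + 1])).filterMap
          (fun m => pvSel nullable m.testBit (x :: xs)))
        = (l.filterMap (fun m => pvSel nullable m.testBit xs)).flatMap (fun r => [r, x :: r]) := by
  intro l
  induction l with
  | nil => simp
  | cons q l ih =>
    simp only [List.flatMap_cons, List.filterMap_append, List.filterMap_cons,
      List.filterMap_nil, pvSel_even, pvSel_odd, List.contains_eq_mem, hn, decide_true,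
      if_pos, ih]
    cases pvSel nullable (Nat.testBit q) xs <;> simp

theorem pvStep_not_mem (nullable : List String) (x : String) (xs : List String)
    (hn : x ∉ nullable) :
    ∀ (l : List Nat),
      ((l.flatMap (fun q => [2 * q, 2 * q + 1])).filterMap
          (fun m => pvSel nullable m.testBit (x :: xs)))
        = (l.filterMap (fun m => pvSel nullable m.testBit xs)).map (fun r => x :: r) := by
  intro l
  induction l with
  | nil => simp
  | cons q l ih =>
    simp only [List.flatMap_cons, List.filterMap_append, List.filterMap_cons,
      List.filterMap_nil, pvSel_even, pvSel_odd, List.contains_eq_mem, hn, decide_false,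
      Bool.false_eq_true, if_neg, not_false_iff, ih]
    cases pvSel nullable (Nat.testBit q) xs <;> simp

theorem pvEnum_eq_combosB (nullable : List String) :
    ∀ (prod : List String),
      (List.range (2 ^ prod.length)).filterMap (fun m => pvSel nullable m.testBit prod)
        = pvCombosB nullable prod := by
  intro prod
  induction prod with
  | nil => simp [pvSel, pvCombosB]
  | cons x xs ih =>
    have hlen : (2 : Nat) ^ (x :: xs).length = 2 * 2 ^ xs.length := by
      simp [List.length_cons, pow_succ]; ring
    rw [hlen, pvRange_double]
    by_cases hn : x ∈ nullable
    · rw [pvStep_mem nullable x xs hn, ih]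
      simp [pvCombosB, List.contains_eq_mem, hn]
    · rw [pvStep_not_mem nullable x xs hn, ih]
      simp [pvCombosB, List.contains_eq_mem, hn]

-- A's collection fold = nonempty-filtered enumeration
theorem pvCollect_fold (nullable production : List String) :
    ∀ (l : List Nat) (a : List (List String)),
      l.foldl (pvCollectA nullable production) a
        = a ++ ((l.filterMap (fun m => pvSel nullable m.testBit production)).filter
            (fun c => decide (c ≠ []))) := by
  intro l
  induction l with
  | nil => simp
  | cons m l ih =>
    intro a
    simp only [List.foldl_cons, List.filterMap_cons]
    rw [ih]
    simp only [pvCollectA, pvBuild_zero]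
    cases hg : pvSel nullable m.testBit production with
    | none => simp
    | some c =>
      by_cases hc : c = []
      · simp [hc]
      · simp [hc]

-- ===== VERDICT (by name: the statement is the Claim_ definition above) =====
theorem generate_nullable_combinations_spec : Claim_equal_generate_nullable_combinations := by
  intro production nullable _
  unfold Spec_generate_nullable_combinations
  unfold generate_nullable_combinations generate_nullable_combinations_alt
  by_cases hp : production = []
  · simp [hp]
  · simp only [hp, if_neg, not_false_iff]
    rw [pvCollect_fold nullable production (List.range (2 ^ production.length)) [],
      pvEnum_eq_combosB nullable production, List.nil_append]
    rw [List.foldl_filter]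
    simp only [decide_eq_true_eq]
    rfl
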